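-- pv_equiv track=rewrite | github.com/mgamota2/nn_cryptanalysis | run_present.py | walsh_transform_sbox
-- ===== SOURCE A (Python) =====
-- import math
--
-- def walsh_transform_sbox(sbox):
--     """Compute the nonlinearity of an S-box."""
--     n = int(math.log2(len(sbox)))
--     max_walsh = 0
--
--     for a in range(1, 1 << n):  # skip a=0
--         for b in range(1 << n):
--             total = 0
--             for x in range(1 << n):
--                 # dot products <a,x> and <b,Φ(x)> over GF(2)
--                 ax = bin(a & x).count('1') % 2
--                 bphi = bin(b & sbox[x]).count('1') % 2
--                 total += (-1) ** (ax ^ bphi)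
--             max_walsh = max(max_walsh, abs(total))
--
--     # Compute nonlinearity
--     nl = (2**(n - 1)) - (max_walsh // 2)
--     return nl
-- ===== SOURCE B (Python) =====
-- def _fwht(f):
--     """Recursive fast Walsh-Hadamard transform (sign convention +/+, +/-)."""
--     if len(f) <= 1:
--         return list(f)
--     h = len(f) // 2
--     lo = _fwht(f[:h])
--     hi = _fwht(f[h:])
--     return [lo[i] + hi[i] for i in range(h)] + [lo[i] - hi[i] for i in range(h)]
--
-- def walsh_transform_sbox(sbox):
--     """Compute the nonlinearity of an S-box via a fast Walsh-Hadamard transform."""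
--     n = len(sbox).bit_length() - 1
--     N = 1 << n
--     max_w = 0
--     for b in range(N):
--         f = [1 - 2 * (bin(b & sbox[x]).count("1") % 2) for x in range(N)]
--         spec = _fwht(f)
--         for a in range(1, N):
--             max_w = max(max_w, abs(spec[a]))
--     return (1 << (n - 1)) - max_w // 2
-- ===== Notes on version B (the rewrite author's own statement) =====
-- stated objective: faster
-- what changed: Replaces the naive per-(a,b) O(N) inner correlation sum (O(N^3) total) by one recursive fast Walsh-Hadamard transform per output mask b, giving the whole Walsh row for all input masks a at once in O(N log N).
-- outside the precondition, e.g. on walsh_transform_sbox([0]): A returns 0.5, B raises ValueError; on walsh_transform_sbox([7]): A returns 0.5, B raises ValueError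
import Mathlib
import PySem

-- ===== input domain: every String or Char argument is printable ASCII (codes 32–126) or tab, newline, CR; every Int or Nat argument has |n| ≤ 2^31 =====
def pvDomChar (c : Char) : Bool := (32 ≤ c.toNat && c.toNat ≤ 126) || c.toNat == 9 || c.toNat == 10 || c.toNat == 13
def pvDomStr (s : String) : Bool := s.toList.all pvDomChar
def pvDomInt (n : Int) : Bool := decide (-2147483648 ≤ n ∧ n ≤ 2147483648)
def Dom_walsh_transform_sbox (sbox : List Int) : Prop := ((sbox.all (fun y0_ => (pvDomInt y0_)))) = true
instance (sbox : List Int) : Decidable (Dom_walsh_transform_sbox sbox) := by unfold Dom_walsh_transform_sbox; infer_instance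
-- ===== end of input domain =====

-- B replaces A's per-(a,b) O(N) correlation loop (O(N^3) total, N = 2^n) by one recursive
-- fast Walsh-Hadamard transform per output mask b (objective: faster, asymptotic).

-- ===== PORT A =====
-- 'int(math.log2(len(sbox)))' is ported as Nat.log2 (the floor of log2, which is what the
-- Python expression computes on the machine-representable sizes the claims cover).
def walsh_transform_sbox (sbox : List Int) : Int :=
  let n : Nat := Nat.log2 sbox.length
  let max_walsh : Int :=
    (PySem.List.pyRange 1 ((1:Int) <<< n) 1).foldl (fun mw a =>
      (PySem.List.pyRange 0 ((1:Int) <<< n) 1).foldl (fun mw b =>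
        let total : Int :=
          (PySem.List.pyRange 0 ((1:Int) <<< n) 1).foldl (fun total x =>
            let ax : Nat := (PySem.Int.bitCount (PySem.Int.band a x)) % 2
            let bphi : Nat := (PySem.Int.bitCount (PySem.Int.band b (PySem.List.pyGetD sbox x 0))) % 2
            total + (-1 : Int) ^ (ax ^^^ bphi)) 0
        max mw |total|) mw) 0
  (2 : Int) ^ (n - 1) - PySem.Int.floordiv max_walsh 2

-- ===== PORT B =====
-- recursive FWHT helper, as _fwht in Source B; the indices i and x are always in range, so
-- pyGetD's default is never used
def pvFwht (f : List Int) : List Int :=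
  if _h : f.length ≤ 1 then f
  else
    let hl : Nat := f.length / 2
    let lo := pvFwht (PySem.List.slice f none (some (hl : Int)))
    let hi := pvFwht (PySem.List.slice f (some (hl : Int)) none)
    (PySem.List.pyRange 0 (hl : Int) 1).map
        (fun i => PySem.List.pyGetD lo i 0 + PySem.List.pyGetD hi i 0)
      ++ (PySem.List.pyRange 0 (hl : Int) 1).map
        (fun i => PySem.List.pyGetD lo i 0 - PySem.List.pyGetD hi i 0)
termination_by f.length
decreasing_by
  · rw [PySem.List.slice_to_natCast]; simp; omega
  · rw [PySem.List.slice_from_natCast]; simp; omega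

def walsh_transform_sbox_alt (sbox : List Int) : Int :=
  let n : Nat := PySem.Int.bitLength (sbox.length : Int) - 1
  let N : Int := (1:Int) <<< n
  let max_w : Int :=
    (PySem.List.pyRange 0 N 1).foldl (fun mw b =>
      let f := (PySem.List.pyRange 0 N 1).map (fun x =>
        1 - 2 * (((PySem.Int.bitCount (PySem.Int.band b (PySem.List.pyGetD sbox x 0))) % 2 : Nat) : Int))
      let spec := pvFwht f
      (PySem.List.pyRange 1 N 1).foldl (fun mw a => max mw |PySem.List.pyGetD spec a 0|) mw) 0
  ((1:Int) <<< (n - 1)) - PySem.Int.floordiv max_w 2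

-- ===== PRECONDITION & SPEC =====
-- Pre_ excludes the empty list, on which A raises ValueError (math.log2(0.0)), and
-- singleton lists, on which A returns the float 0.5 (2**(0-1) - 0), not an integer
-- (B raises ValueError there).
def Pre_walsh_transform_sbox (sbox : List Int) : Prop := 2 ≤ sbox.length
instance (sbox : List Int) : Decidable (Pre_walsh_transform_sbox sbox) := by
  unfold Pre_walsh_transform_sbox; infer_instance
def pvWitness_walsh_transform_sbox : List Int := [3, 0, 2, 1]
def Spec_walsh_transform_sbox (sbox : List Int) (out : Int) : Prop := out = walsh_transform_sbox_alt sbox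
instance (sbox : List Int) (out : Int) : Decidable (Spec_walsh_transform_sbox sbox out) := by unfold Spec_walsh_transform_sbox; infer_instance

-- ===== CLAIM (what is proved, stated in full; the proofs are below) =====
def Claim_equal_walsh_transform_sbox : Prop := ∀ (sbox : List Int), Dom_walsh_transform_sbox sbox → Pre_walsh_transform_sbox sbox → Spec_walsh_transform_sbox sbox (walsh_transform_sbox sbox)

-- ===== LEMMAS AND PROOFS =====

def pvP (m : Nat) : Nat := PySem.Int.bitCount (m : Int)

lemma pvP_zero : pvP 0 = 0 := PySem.Int.bitCount_zero
lemma pvP_rec (m : Nat) (h : 0 < m) : pvP m = m % 2 + pvP (m / 2) := PySem.Int.bitCount_natCast h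

lemma pvP_two_pow_add (k : Nat) : ∀ m, m < 2^k → pvP (2^k + m) = 1 + pvP m := by
  induction k with
  | zero => intro m hm; interval_cases m; decide
  | succ k ih =>
    intro m hm
    have h2 : (2:Nat)^(k+1) = 2 * 2^k := by ring
    have h1 : pvP (2^(k+1) + m) = (2^(k+1) + m) % 2 + pvP ((2^(k+1) + m) / 2) :=
      pvP_rec _ (by positivity)
    have hmod : (2^(k+1) + m) % 2 = m % 2 := by omega
    have hdiv : (2^(k+1) + m) / 2 = 2^k + m / 2 := by omega
    have hlt : m / 2 < 2^k := by omega
    rw [h1, hmod, hdiv, ih _ hlt]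
    rcases Nat.eq_zero_or_pos m with rfl | hm0
    · simp [pvP_zero]
    · rw [pvP_rec m hm0]; omega

lemma land_high_left (k a x : Nat) (hx : x < 2^k) : (2^k + a) &&& x = a &&& x := by
  apply Nat.eq_of_testBit_eq
  intro i
  simp only [Nat.testBit_land]
  rcases lt_or_ge i k with hik | hik
  · rw [Nat.testBit_two_pow_add_gt hik]
  · have : x.testBit i = false :=
      Nat.testBit_eq_false_of_lt (lt_of_lt_of_le hx (Nat.pow_le_pow_right (by omega) hik))
    simp [this]

lemma land_high_both (k a x : Nat) (ha : a < 2^k) (hx : x < 2^k) :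
    (2^k + a) &&& (2^k + x) = 2^k + (a &&& x) := by
  have hax : a &&& x < 2^k := lt_of_le_of_lt Nat.and_le_left ha
  apply Nat.eq_of_testBit_eq
  intro i
  simp only [Nat.testBit_land]
  rcases lt_trichotomy i k with hik | rfl | hik
  · rw [Nat.testBit_two_pow_add_gt hik, Nat.testBit_two_pow_add_gt hik,
        Nat.testBit_two_pow_add_gt hik, Nat.testBit_land]
  · rw [Nat.testBit_two_pow_add_eq, Nat.testBit_two_pow_add_eq, Nat.testBit_two_pow_add_eq,
        Nat.testBit_eq_false_of_lt ha, Nat.testBit_eq_false_of_lt hx,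
        Nat.testBit_eq_false_of_lt hax]
    rfl
  · have hb : ∀ m : Nat, m < 2^k → (2^k + m).testBit i = false := by
      intro m hm
      exact Nat.testBit_eq_false_of_lt
        (lt_of_lt_of_le (by omega) (Nat.pow_le_pow_right (by omega) hik))
    simp [hb a ha, hb x hx, hb _ hax]

lemma term_eq (u v : Nat) :
    (-1:Int)^((u % 2) ^^^ (v % 2)) = (-1:Int)^u * (1 - 2 * ((v % 2 : Nat) : Int)) := by
  have hpu : (-1:Int)^u = if u % 2 = 0 then 1 else -1 := by
    rcases Nat.mod_two_eq_zero_or_one u with h | h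
    · simp [h, Even.neg_one_pow (Nat.even_iff.mpr h)]
    · simp [h, Odd.neg_one_pow (Nat.odd_iff.mpr h)]
  rcases Nat.mod_two_eq_zero_or_one u with hu | hu <;>
    rcases Nat.mod_two_eq_zero_or_one v with hv | hv <;>
      norm_num [hu, hv, hpu]

lemma land_high_right (k a x : Nat) (ha : a < 2^k) : a &&& (2^k + x) = a &&& x := by
  rw [Nat.land_comm, land_high_left k x a ha, Nat.land_comm]


lemma pvFwht_spec (k : Nat) : ∀ (f : List Int), f.length = 2^k → ∀ a : Nat, a < 2^k →
    (pvFwht f).getD a 0 = ∑ x ∈ Finset.range (2^k), (-1:Int)^(pvP (a &&& x)) * f.getD x 0 := by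
  induction k with
  | zero =>
    intro f hf a ha
    interval_cases a
    obtain ⟨v, rfl⟩ := List.length_eq_one_iff.mp hf
    rw [pvFwht]
    norm_num [pvP_zero]
  | succ k ih =>
    intro f hf a ha
    have h2 : (2:Nat)^(k+1) = 2^k + 2^k := by ring
    have hlen1 : ¬ f.length ≤ 1 := by
      rw [hf]; have := Nat.one_lt_two_pow_iff.mpr (Nat.succ_ne_zero k); omega
    have hhl : f.length / 2 = 2^k := by omega
    rw [pvFwht]
    simp only [hlen1, dite_false]
    rw [hhl, PySem.List.slice_to_natCast, PySem.List.slice_from_natCast,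
        PySem.List.pyRange_zero_natCast, List.map_map, List.map_map]
    have htl : (f.take (2^k)).length = 2^k := by simp [hf]; omega
    have hdl : (f.drop (2^k)).length = 2^k := by simp [hf]; omega
    have hIHu := ih (f.take (2^k)) htl
    have hIHv := ih (f.drop (2^k)) hdl
    have hsplit : ∀ F : Nat → Int, ∑ x ∈ Finset.range (2^(k+1)), F x
        = (∑ x ∈ Finset.range (2^k), F x) + ∑ x ∈ Finset.range (2^k), F (2^k + x) := by
      intro F; rw [h2, Finset.sum_range_add]
    have hgt : ∀ x : Nat, x < 2^k → (f.take (2^k)).getD x 0 = f.getD x 0 := by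
      intro x hx
      rw [List.getD_eq_getElem _ _ (by omega), List.getD_eq_getElem _ _ (by omega),
          List.getElem_take]
    have hgd : ∀ x : Nat, x < 2^k → (f.drop (2^k)).getD x 0 = f.getD (2^k + x) 0 := by
      intro x hx
      rw [List.getD_eq_getElem _ _ (by omega), List.getD_eq_getElem _ _ (by omega),
          List.getElem_drop]
    rcases lt_or_ge a (2^k) with hak | hak
    · rw [List.getD_append _ _ _ _ (by simpa using hak),
          PySem.List.getD_map_range _ _ _ _ hak]
      simp only [Function.comp_apply, PySem.List.pyGetD_natCast]
      rw [hsplit (fun x => (-1:Int)^(pvP (a &&& x)) * f.getD x 0)]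
      have h1 : ∀ x ∈ Finset.range (2^k),
          (-1:Int)^(pvP (a &&& x)) * f.getD x 0
            = (-1:Int)^(pvP (a &&& x)) * (f.take (2^k)).getD x 0 := fun x hx => by
        rw [hgt x (Finset.mem_range.mp hx)]
      have h2' : ∀ x ∈ Finset.range (2^k),
          (-1:Int)^(pvP (a &&& (2^k + x))) * f.getD (2^k + x) 0
            = (-1:Int)^(pvP (a &&& x)) * (f.drop (2^k)).getD x 0 := fun x hx => by
        rw [hgd x (Finset.mem_range.mp hx), land_high_right k a x hak]
      rw [Finset.sum_congr rfl h1, Finset.sum_congr rfl h2', hIHu a hak, hIHv a hak]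
    · obtain ⟨a', rfl⟩ : ∃ a', a = 2^k + a' := ⟨a - 2^k, by omega⟩
      have ha' : a' < 2^k := by omega
      rw [List.getD_append_right _ _ _ _ (by simp)]
      simp only [List.length_map, List.length_range, Nat.add_sub_cancel_left]
      rw [PySem.List.getD_map_range _ _ _ _ ha']
      simp only [Function.comp_apply, PySem.List.pyGetD_natCast]
      rw [hsplit (fun x => (-1:Int)^(pvP ((2^k + a') &&& x)) * f.getD x 0)]
      have h1 : ∀ x ∈ Finset.range (2^k),
          (-1:Int)^(pvP ((2^k + a') &&& x)) * f.getD x 0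
            = (-1:Int)^(pvP (a' &&& x)) * (f.take (2^k)).getD x 0 := fun x hx => by
        rw [hgt x (Finset.mem_range.mp hx), land_high_left k a' x (Finset.mem_range.mp hx)]
      have h2' : ∀ x ∈ Finset.range (2^k),
          (-1:Int)^(pvP ((2^k + a') &&& (2^k + x))) * f.getD (2^k + x) 0
            = -((-1:Int)^(pvP (a' &&& x)) * (f.drop (2^k)).getD x 0) := fun x hx => by
        have hx' := Finset.mem_range.mp hx
        rw [hgd x hx', land_high_both k a' x ha' hx',
            pvP_two_pow_add k _ (lt_of_le_of_lt Nat.and_le_left ha'), pow_add]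
        ring
      rw [Finset.sum_congr rfl h1, Finset.sum_congr rfl h2', hIHu _ ha', hIHv _ ha',
          Finset.sum_neg_distrib]
      ring

lemma foldl_max_extract {α : Type} (h : α → Int) :
    ∀ (l : List α) (m0 : Int), 0 ≤ m0 →
      l.foldl (fun m x => max m (h x)) m0 = max m0 (l.foldr (fun x m => max (h x) m) 0) := by
  intro l
  induction l with
  | nil => intro m0 hm0; simp [max_eq_left hm0]
  | cons x t ih =>
    intro m0 hm0
    simp only [List.foldl_cons, List.foldr_cons]
    rw [ih (max m0 (h x)) (le_trans hm0 (le_max_left _ _)), max_assoc]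

lemma foldr_max_pointwise {β : Type} (p q : β → Int) :
    ∀ l : List β,
      max (l.foldr (fun b m => max (p b) m) 0) (l.foldr (fun b m => max (q b) m) 0)
        = l.foldr (fun b m => max (max (p b) (q b)) m) 0 := by
  intro l
  induction l with
  | nil => simp
  | cons b t ih => simp only [List.foldr_cons]; rw [max_max_max_comm, ih]

lemma foldr_max_swap {α β : Type} (g : α → β → Int) (l1 : List α) (l2 : List β) :
    l1.foldr (fun a m => max (l2.foldr (fun b m' => max (g a b) m') 0) m) 0
      = l2.foldr (fun b m => max (l1.foldr (fun a m' => max (g a b) m') 0) m) 0 := by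
  induction l1 with
  | nil =>
    simp only [List.foldr_nil]
    have aux : ∀ t : List β, List.foldr (fun _ m => max 0 m) (0:Int) t = 0 := by
      intro t
      induction t with
      | nil => rfl
      | cons b t ih => simp only [List.foldr_cons, ih]; simp
    exact (aux l2).symm
  | cons a t ih =>
    simp only [List.foldr_cons]
    rw [ih, foldr_max_pointwise]

lemma nested_max_eq {α β : Type} (g : α → β → Int) (l2 : List β) :
    ∀ (l1 : List α) (m0 : Int), 0 ≤ m0 →
    l1.foldl (fun mw a => l2.foldl (fun mw' b => max mw' (g a b)) mw) m0
      = max m0 (l1.foldr (fun a m => max (l2.foldr (fun b m' => max (g a b) m') 0) m) 0) := by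
  intro l1
  induction l1 with
  | nil => intro m0 hm0; simp [max_eq_left hm0]
  | cons a t ih =>
    intro m0 hm0
    simp only [List.foldl_cons, List.foldr_cons]
    rw [foldl_max_extract (g a) l2 m0 hm0,
        ih _ (le_trans hm0 (le_max_left _ _)), max_assoc]

lemma pvShift (n : Nat) : (1:Int) <<< n = ((2^n : Nat) : Int) := by
  simp [Int.shiftLeft_eq]

lemma pvRangeA (n : Nat) :
    PySem.List.pyRange 0 ((1:Int) <<< n) 1 = (List.range (2^n)).map (fun k : Nat => (k : Int)) := by
  rw [pvShift]
  exact PySem.List.pyRange_zero_natCast _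

lemma pvRangeB (n : Nat) :
    PySem.List.pyRange 1 ((1:Int) <<< n) 1
      = (List.range (2^n - 1)).map (fun k => ((1 + k : Nat) : Int)) := by
  rw [pvShift, PySem.List.pyRange_one]
  have : ((2^n : Nat) - (1:Int)).toNat = 2^n - 1 := by omega
  rw [this]
  exact List.map_congr_left (fun k _ => by push_cast; ring)

lemma list_sum_range {m : Nat} (f : Nat → Int) :
    ((List.range m).map f).sum = ∑ x ∈ Finset.range m, f x := rfl

-- the common ±1 table value f_b(x) and the Walsh sum both programs compute
def pvF (sbox : List Int) (b x : Int) : Int :=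
  1 - 2 * (((PySem.Int.bitCount (PySem.Int.band b (PySem.List.pyGetD sbox x 0))) % 2 : Nat) : Int)
def pvT (sbox : List Int) (k : Nat) (a : Nat) (b : Int) : Int :=
  ∑ x ∈ Finset.range (2^k), (-1:Int)^(pvP (a &&& x)) * pvF sbox b (x : Int)

lemma totalA_eq (sbox : List Int) (n : Nat) (b : Int) (an : Nat) :
    (List.range (2^n)).foldl (fun total j =>
        total + (-1 : Int) ^ (((PySem.Int.bitCount (PySem.Int.band ((an : Nat) : Int) ((j : Nat) : Int))) % 2) ^^^
          ((PySem.Int.bitCount (PySem.Int.band b (PySem.List.pyGetD sbox ((j : Nat) : Int) 0))) % 2))) 0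
      = pvT sbox n an b := by
  rw [PySem.List.foldl_add, list_sum_range, zero_add]
  apply Finset.sum_congr rfl
  intro j _
  rw [PySem.Int.band_natCast]
  exact term_eq (pvP (an &&& j)) _

lemma specB_eq (sbox : List Int) (n : Nat) (b : Int) (ak : Nat) (hak : ak < 2^n) :
    PySem.List.pyGetD (pvFwht ((List.range (2^n)).map (fun j =>
        (fun x => 1 - 2 * (((PySem.Int.bitCount (PySem.Int.band b (PySem.List.pyGetD sbox x 0))) % 2 : Nat) : Int)) ((j : Nat) : Int))))
      ((ak : Nat) : Int) 0
      = pvT sbox n ak b := by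
  rw [PySem.List.pyGetD_natCast]
  have hlen : ((List.range (2^n)).map (fun j =>
      (fun x => 1 - 2 * (((PySem.Int.bitCount (PySem.Int.band b (PySem.List.pyGetD sbox x 0))) % 2 : Nat) : Int)) ((j : Nat) : Int))).length = 2^n := by
    simp
  rw [pvFwht_spec n _ hlen ak hak]
  apply Finset.sum_congr rfl
  intro x hx
  rw [PySem.List.getD_map_range _ _ _ _ (Finset.mem_range.mp hx)]
  rfl

lemma bitLength_sub_one_eq_log2 (m : Nat) (hm : 1 ≤ m) :
    PySem.Int.bitLength (m : Int) - 1 = Nat.log2 m := by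
  have h1 : m < 2 ^ PySem.Int.bitLength (m : Int) := by
    have := PySem.Int.lt_two_pow_bitLength (m : Int)
    simpa using this
  have h0 : 1 ≤ PySem.Int.bitLength (m : Int) := by
    by_contra h
    have : PySem.Int.bitLength (m : Int) = 0 := by omega
    rw [this] at h1; omega
  have h2 : 2 ^ (PySem.Int.bitLength (m : Int) - 1) ≤ m := by
    have := PySem.Int.two_pow_bitLength_le (m : Int) (Nat.cast_ne_zero.mpr (by omega))
    simpa using this
  rw [Nat.log2_eq_log_two]
  exact (Nat.log_eq_of_pow_le_of_lt_pow h2 (by rw [Nat.sub_add_cancel h0]; exact h1)).symm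

theorem main_eq (sbox : List Int) (hpre : 2 ≤ sbox.length) :
    walsh_transform_sbox sbox = walsh_transform_sbox_alt sbox := by
  simp only [walsh_transform_sbox, walsh_transform_sbox_alt]
  rw [bitLength_sub_one_eq_log2 sbox.length (by omega)]
  set n := Nat.log2 sbox.length with hn
  rw [pvRangeA, pvRangeB, pvShift (n-1)]
  simp only [List.foldl_map, List.map_map, Function.comp_def, totalA_eq]
  have hB : (List.range (2^n)).foldl (fun mw j =>
        (List.range (2^n - 1)).foldl (fun mw' k =>
          max mw' |PySem.List.pyGetD (pvFwht ((List.range (2^n)).map (fun x =>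
            1 - 2 * (((PySem.Int.bitCount (PySem.Int.band ((j:Nat):Int) (PySem.List.pyGetD sbox ((x:Nat):Int) 0))) % 2 : Nat) : Int))))
            (((1 + k : Nat) : Int)) 0|) mw) 0
      = (List.range (2^n)).foldl (fun mw j =>
        (List.range (2^n - 1)).foldl (fun mw' k =>
          max mw' |pvT sbox n (1 + k) ((j:Nat):Int)|) mw) 0 := by
    apply PySem.List.foldl_congr_mem
    intro acc j _
    apply PySem.List.foldl_congr_mem
    intro acc' k hk
    have hk' : 1 + k < 2^n := by have := List.mem_range.mp hk; omega
    rw [specB_eq sbox n _ (1+k) hk']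
  rw [hB]
  rw [nested_max_eq (fun k j => |pvT sbox n (1 + k) ((j:Nat):Int)|) (List.range (2^n))
        (List.range (2^n - 1)) 0 le_rfl,
      nested_max_eq (fun j k => |pvT sbox n (1 + k) ((j:Nat):Int)|) (List.range (2^n - 1))
        (List.range (2^n)) 0 le_rfl,
      foldr_max_swap (fun k j => |pvT sbox n (1 + k) ((j:Nat):Int)|) (List.range (2^n - 1))
        (List.range (2^n))]
  push_cast
  ring

-- ===== VERDICT (by name: the statement is the Claim_ definition above) =====
theorem walsh_transform_sbox_spec : Claim_equal_walsh_transform_sbox := by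
  intro sbox _hdom hpre
  unfold Pre_walsh_transform_sbox at hpre
  unfold Spec_walsh_transform_sbox
  exact main_eq sbox hpre
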